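-- pv_equiv track=rewrite | github.com/Ahmed-Ragy-3/DSA | movepuzzle.py | is_goal
-- ===== SOURCE A (Python) =====
-- def is_goal(board):
--     if board[3][3] is not None: return False
--     checker = 1
--     for i in range(4):
--         for j in range(4):
--             if i == 3 and j == 3:
--                 break
--             if checker != board[i][j]:
--                 return False
--             checker += 1
--     return True
-- ===== SOURCE B (Python) =====
-- def is_goal(board):
--     # Inverted index: map each cell value to its (row, col), then check that
--     # every value 1..15 sits at the position the goal assigns it and the blank at (3, 3).
--     pos = {board[i][j]: (i, j) for i in range(4) for j in range(4)}
--     return all(pos.get(v) == divmod(v - 1, 4) for v in range(1, 16)) and pos.get(None) == (3, 3)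
-- ===== Notes on version B (the rewrite author's own statement) =====
-- stated objective: alternative
-- what changed: Replaces A's stateful counter scan (nested loops, per-cell compare, early return, break) with an inverted index: build a dict mapping each cell value to its (row, col) position once, then check that every value 1..15 sits at the position divmod assigns it and the blank at (3, 3).
-- outside the precondition, e.g. on is_goal([[], [], [], [None, None, None, 1]]): A returns False, B raises IndexError
import Mathlib
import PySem

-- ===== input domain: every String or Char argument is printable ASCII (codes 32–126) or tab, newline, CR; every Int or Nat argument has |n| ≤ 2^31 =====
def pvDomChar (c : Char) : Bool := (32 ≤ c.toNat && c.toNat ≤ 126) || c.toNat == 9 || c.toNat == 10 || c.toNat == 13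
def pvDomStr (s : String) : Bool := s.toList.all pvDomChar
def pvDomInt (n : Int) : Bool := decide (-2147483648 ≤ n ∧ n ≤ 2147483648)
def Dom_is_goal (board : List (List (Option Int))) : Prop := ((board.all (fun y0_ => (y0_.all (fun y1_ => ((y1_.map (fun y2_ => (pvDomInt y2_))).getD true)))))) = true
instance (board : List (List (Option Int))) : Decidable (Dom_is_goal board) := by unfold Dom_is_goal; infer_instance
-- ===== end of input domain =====

-- B replaces A's stateful counter scan with an inverted index: it builds a dict mapping
-- each cell value to its (row, col) and checks that every value 1..15 sits at the position
-- divmod assigns it and the blank at (3, 3) (objective: alternative).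

-- ===== PORT A =====
-- inner 'for j in range(4)' body: some checker' = fell through, none = 'return False' (or IndexError, outside Pre_)
def isGoalLoopJ (row : List (Option Int)) (i : Int) (checker : Int) : List Int → Option Int
  | [] => some checker
  | j :: js =>
    if i = 3 ∧ j = 3 then some checker    -- break (ends the inner loop)
    else
      match PySem.List.pyGet? row j with
      | none => none                       -- IndexError (excluded by Pre_)
      | some v => if v ≠ some checker then none else isGoalLoopJ row i (checker + 1) js

-- outer 'for i in range(4)' loop
def isGoalLoopI (board : List (List (Option Int))) (checker : Int) : List Int → Bool
  | [] => true
  | i :: is' =>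
    match PySem.List.pyGet? board i with
    | none => false                        -- IndexError (excluded by Pre_)
    | some row =>
      match isGoalLoopJ row i checker (PySem.List.pyRange 0 4 1) with
      | none => false
      | some c => isGoalLoopI board c is'

def is_goal (board : List (List (Option Int))) : Bool :=
  match PySem.List.pyGet? board 3 with
  | none => false                          -- IndexError (excluded by Pre_)
  | some r3 =>
    match PySem.List.pyGet? r3 3 with
    | none => false                        -- IndexError (excluded by Pre_)
    | some c =>
      if c ≠ none then false               -- 'if board[3][3] is not None: return False'
      else isGoalLoopI board 1 (PySem.List.pyRange 0 4 1)

-- ===== PORT B =====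
def is_goal_alt (board : List (List (Option Int))) : Bool :=
  -- pos = {board[i][j]: (i, j) for i in range(4) for j in range(4)}; none = IndexError (excluded by Pre_)
  match (PySem.List.pyRange 0 4 1).mapM (fun i =>
          (PySem.List.pyRange 0 4 1).mapM (fun j =>
            ((PySem.List.pyGet? board i).bind (fun r => PySem.List.pyGet? r j)).map
              (fun c => (c, (i, j))))) with
  | none => false
  | some rows =>
    let pos : PySem.Dict (Option Int) (Int × Int) :=
      rows.flatten.foldl (fun d p => d.insert p.1 p.2) PySem.Dict.empty
    -- all(pos.get(v) == divmod(v - 1, 4) for v in range(1, 16)) and pos.get(None) == (3, 3)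
    -- (pos.get(v) is a tuple or None → Option; divmod? is 'some' since 4 ≠ 0, so '==' on Option is exact)
    ((PySem.List.pyRange 1 16 1).all (fun v =>
        pos.get? (some v) == PySem.Int.divmod? (v - 1) 4))
      && (pos.get? none == some (3, 3))

-- ===== PRECONDITION & SPEC =====
-- Pre_ is the natural 4x4-board domain: at least 4 rows, each of the first 4 rows with at
-- least 4 cells; it excludes malformed boards on which A's early returns can still yield
-- False before a short row is reached (e.g. board[3][3] non-blank) while B's dict
-- comprehension raises IndexError.
def Pre_is_goal (board : List (List (Option Int))) : Prop :=
  4 ≤ board.length ∧ ∀ row ∈ board.take 4, 4 ≤ row.length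
instance (board : List (List (Option Int))) : Decidable (Pre_is_goal board) := by
  unfold Pre_is_goal; infer_instance

def pvWitness_is_goal : List (List (Option Int)) :=
  [[some 1, some 2, some 3, some 4], [some 5, some 6, some 7, some 8],
   [some 9, some 10, some 11, some 12], [some 13, some 14, some 15, none]]

def Spec_is_goal (board : List (List (Option Int))) (out : Bool) : Prop := out = is_goal_alt board
instance (board : List (List (Option Int))) (out : Bool) : Decidable (Spec_is_goal board out) := by
  unfold Spec_is_goal; infer_instance

-- ===== CLAIM (what is proved, stated in full; the proofs are below) =====
def Claim_equal_is_goal : Prop := ∀ (board : List (List (Option Int))), Dom_is_goal board → Pre_is_goal board → Spec_is_goal board (is_goal board)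

-- ===== LEMMAS AND PROOFS =====

-- the goal configuration, cell by cell
def pvGoalCells (a0 a1 a2 a3 b0 b1 b2 b3 c0 c1 c2 c3 d0 d1 d2 d3 : Option Int) : Prop :=
  a0 = some 1 ∧ a1 = some 2 ∧ a2 = some 3 ∧ a3 = some 4 ∧
  b0 = some 5 ∧ b1 = some 6 ∧ b2 = some 7 ∧ b3 = some 8 ∧
  c0 = some 9 ∧ c1 = some 10 ∧ c2 = some 11 ∧ c3 = some 12 ∧
  d0 = some 13 ∧ d1 = some 14 ∧ d2 = some 15 ∧ d3 = none

-- pyGet? on a cons list at the small literal indices the two ports use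
theorem pg1 {α : Type} (x0 x1 : α) (t : List α) : PySem.List.pyGet? (x0::x1::t) 1 = some x1 := by
  rw [show (1:Int) = ((1:Nat):Int) by norm_num, PySem.List.pyGet?_natCast]; rfl
theorem pg2 {α : Type} (x0 x1 x2 : α) (t : List α) : PySem.List.pyGet? (x0::x1::x2::t) 2 = some x2 := by
  rw [show (2:Int) = ((2:Nat):Int) by norm_num, PySem.List.pyGet?_natCast]; rfl
theorem pg3 {α : Type} (x0 x1 x2 x3 : α) (t : List α) : PySem.List.pyGet? (x0::x1::x2::x3::t) 3 = some x3 := by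
  rw [show (3:Int) = ((3:Nat):Int) by norm_num, PySem.List.pyGet?_natCast]; rfl

-- a 15-deep if-chain of 'some'-values none of which is the target cannot return 'some t'
theorem pvChain15 {β : Type} {c1 c2 c3 c4 c5 c6 c7 c8 c9 c10 c11 c12 c13 c14 c15 : Prop} [Decidable c1] [Decidable c2] [Decidable c3] [Decidable c4] [Decidable c5] [Decidable c6] [Decidable c7] [Decidable c8] [Decidable c9] [Decidable c10] [Decidable c11] [Decidable c12] [Decidable c13] [Decidable c14] [Decidable c15] {v1 v2 v3 v4 v5 v6 v7 v8 v9 v10 v11 v12 v13 v14 v15 t : β}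
    (h : (if c1 then some v1 else if c2 then some v2 else if c3 then some v3 else if c4 then some v4 else if c5 then some v5 else if c6 then some v6 else if c7 then some v7 else if c8 then some v8 else if c9 then some v9 else if c10 then some v10 else if c11 then some v11 else if c12 then some v12 else if c13 then some v13 else if c14 then some v14 else if c15 then some v15 else none) = some t) (hn : v1 ≠ t ∧ v2 ≠ t ∧ v3 ≠ t ∧ v4 ≠ t ∧ v5 ≠ t ∧ v6 ≠ t ∧ v7 ≠ t ∧ v8 ≠ t ∧ v9 ≠ t ∧ v10 ≠ t ∧ v11 ≠ t ∧ v12 ≠ t ∧ v13 ≠ t ∧ v14 ≠ t ∧ v15 ≠ t) : False := by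
  by_cases hc1 : c1
  case pos => rw [if_pos hc1] at h; exact hn.1 (Option.some.inj h)
  rw [if_neg hc1] at h
  by_cases hc2 : c2
  case pos => rw [if_pos hc2] at h; exact hn.2.1 (Option.some.inj h)
  rw [if_neg hc2] at h
  by_cases hc3 : c3
  case pos => rw [if_pos hc3] at h; exact hn.2.2.1 (Option.some.inj h)
  rw [if_neg hc3] at h
  by_cases hc4 : c4
  case pos => rw [if_pos hc4] at h; exact hn.2.2.2.1 (Option.some.inj h)
  rw [if_neg hc4] at h
  by_cases hc5 : c5
  case pos => rw [if_pos hc5] at h; exact hn.2.2.2.2.1 (Option.some.inj h)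
  rw [if_neg hc5] at h
  by_cases hc6 : c6
  case pos => rw [if_pos hc6] at h; exact hn.2.2.2.2.2.1 (Option.some.inj h)
  rw [if_neg hc6] at h
  by_cases hc7 : c7
  case pos => rw [if_pos hc7] at h; exact hn.2.2.2.2.2.2.1 (Option.some.inj h)
  rw [if_neg hc7] at h
  by_cases hc8 : c8
  case pos => rw [if_pos hc8] at h; exact hn.2.2.2.2.2.2.2.1 (Option.some.inj h)
  rw [if_neg hc8] at h
  by_cases hc9 : c9
  case pos => rw [if_pos hc9] at h; exact hn.2.2.2.2.2.2.2.2.1 (Option.some.inj h)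
  rw [if_neg hc9] at h
  by_cases hc10 : c10
  case pos => rw [if_pos hc10] at h; exact hn.2.2.2.2.2.2.2.2.2.1 (Option.some.inj h)
  rw [if_neg hc10] at h
  by_cases hc11 : c11
  case pos => rw [if_pos hc11] at h; exact hn.2.2.2.2.2.2.2.2.2.2.1 (Option.some.inj h)
  rw [if_neg hc11] at h
  by_cases hc12 : c12
  case pos => rw [if_pos hc12] at h; exact hn.2.2.2.2.2.2.2.2.2.2.2.1 (Option.some.inj h)
  rw [if_neg hc12] at h
  by_cases hc13 : c13
  case pos => rw [if_pos hc13] at h; exact hn.2.2.2.2.2.2.2.2.2.2.2.2.1 (Option.some.inj h)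
  rw [if_neg hc13] at h
  by_cases hc14 : c14
  case pos => rw [if_pos hc14] at h; exact hn.2.2.2.2.2.2.2.2.2.2.2.2.2.1 (Option.some.inj h)
  rw [if_neg hc14] at h
  by_cases hc15 : c15
  case pos => rw [if_pos hc15] at h; exact hn.2.2.2.2.2.2.2.2.2.2.2.2.2.2 (Option.some.inj h)
  rw [if_neg hc15] at h
  simp at h

-- A's loop returns true exactly on the goal configuration
set_option maxHeartbeats 4000000 in
theorem a_char
    (a0 a1 a2 a3 b0 b1 b2 b3 c0 c1 c2 c3 d0 d1 d2 d3 : Option Int)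
    (t0 t1 t2 t3 : List (Option Int)) (rest : List (List (Option Int))) :
    is_goal ((a0::a1::a2::a3::t0)::(b0::b1::b2::b3::t1)::(c0::c1::c2::c3::t2)::(d0::d1::d2::d3::t3)::rest)
      = true ↔ pvGoalCells a0 a1 a2 a3 b0 b1 b2 b3 c0 c1 c2 c3 d0 d1 d2 d3 := by
  have hr4 : PySem.List.pyRange 0 4 1 = [0,1,2,3] := by decide
  simp [is_goal, hr4, isGoalLoopI, isGoalLoopJ, pg1, pg2, pg3, pvGoalCells]
  by_cases h0 : d3 = none
  case neg => simp_all
  subst h0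
  by_cases e1 : a0 = some 1
  case neg => simp_all
  subst e1
  by_cases e2 : a1 = some 2
  case neg => simp_all
  subst e2
  by_cases e3 : a2 = some 3
  case neg => simp_all
  subst e3
  by_cases e4 : a3 = some 4
  case neg => simp_all
  subst e4
  by_cases e5 : b0 = some 5
  case neg => simp_all
  subst e5
  by_cases e6 : b1 = some 6
  case neg => simp_all
  subst e6
  by_cases e7 : b2 = some 7
  case neg => simp_all
  subst e7
  by_cases e8 : b3 = some 8
  case neg => simp_all
  subst e8
  by_cases e9 : c0 = some 9
  case neg => simp_all
  subst e9
  by_cases e10 : c1 = some 10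
  case neg => simp_all
  subst e10
  by_cases e11 : c2 = some 11
  case neg => simp_all
  subst e11
  by_cases e12 : c3 = some 12
  case neg => simp_all
  subst e12
  by_cases e13 : d0 = some 13
  case neg => simp_all
  subst e13
  by_cases e14 : d1 = some 14
  case neg => simp_all
  subst e14
  by_cases e15 : d2 = some 15
  case neg => simp_all
  subst e15
  norm_num

-- B's inverted-index check returns true exactly on the goal configuration
set_option maxHeartbeats 4000000 in
theorem b_char
    (a0 a1 a2 a3 b0 b1 b2 b3 c0 c1 c2 c3 d0 d1 d2 d3 : Option Int)
    (t0 t1 t2 t3 : List (Option Int)) (rest : List (List (Option Int))) :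
    is_goal_alt ((a0::a1::a2::a3::t0)::(b0::b1::b2::b3::t1)::(c0::c1::c2::c3::t2)::(d0::d1::d2::d3::t3)::rest)
      = true ↔ pvGoalCells a0 a1 a2 a3 b0 b1 b2 b3 c0 c1 c2 c3 d0 d1 d2 d3 := by
  have hr4 : PySem.List.pyRange 0 4 1 = [0,1,2,3] := by decide
  have hr16 : PySem.List.pyRange 1 16 1 = [1,2,3,4,5,6,7,8,9,10,11,12,13,14,15] := by decide
  simp [is_goal_alt, hr4, hr16, pg1, pg2, pg3, List.mapM_cons,
        PySem.Dict.get?_insert, PySem.Dict.get?_empty, PySem.Int.divmod?, pvGoalCells]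
  constructor
  · intro h
    obtain ⟨⟨h1, h2, h3, h4, h5, h6, h7, h8, h9, h10, h11, h12, h13, h14, h15⟩, h16⟩ := h
    by_cases hd : (none : Option Int) = d3
    case neg => exact (pvChain15 (h16 hd) (by decide)).elim
    subst hd
    by_cases hk15 : (some 15 : Option Int) = d2
    case neg => rw [if_neg hk15] at h15; exact (pvChain15 h15 (by decide)).elim
    subst hk15
    by_cases hk14 : (some 14 : Option Int) = d1
    case neg => rw [if_neg hk14] at h14; exact (pvChain15 h14 (by decide)).elim
    subst hk14
    by_cases hk13 : (some 13 : Option Int) = d0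
    case neg => rw [if_neg hk13] at h13; exact (pvChain15 h13 (by decide)).elim
    subst hk13
    by_cases hk12 : (some 12 : Option Int) = c3
    case neg => rw [if_neg hk12] at h12; exact (pvChain15 h12 (by decide)).elim
    subst hk12
    by_cases hk11 : (some 11 : Option Int) = c2
    case neg => rw [if_neg hk11] at h11; exact (pvChain15 h11 (by decide)).elim
    subst hk11
    by_cases hk10 : (some 10 : Option Int) = c1
    case neg => rw [if_neg hk10] at h10; exact (pvChain15 h10 (by decide)).elim
    subst hk10
    by_cases hk9 : (some 9 : Option Int) = c0
    case neg => rw [if_neg hk9] at h9; exact (pvChain15 h9 (by decide)).elim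
    subst hk9
    by_cases hk8 : (some 8 : Option Int) = b3
    case neg => rw [if_neg hk8] at h8; exact (pvChain15 h8 (by decide)).elim
    subst hk8
    by_cases hk7 : (some 7 : Option Int) = b2
    case neg => rw [if_neg hk7] at h7; exact (pvChain15 h7 (by decide)).elim
    subst hk7
    by_cases hk6 : (some 6 : Option Int) = b1
    case neg => rw [if_neg hk6] at h6; exact (pvChain15 h6 (by decide)).elim
    subst hk6
    by_cases hk5 : (some 5 : Option Int) = b0
    case neg => rw [if_neg hk5] at h5; exact (pvChain15 h5 (by decide)).elim
    subst hk5
    by_cases hk4 : (some 4 : Option Int) = a3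
    case neg => rw [if_neg hk4] at h4; exact (pvChain15 h4 (by decide)).elim
    subst hk4
    by_cases hk3 : (some 3 : Option Int) = a2
    case neg => rw [if_neg hk3] at h3; exact (pvChain15 h3 (by decide)).elim
    subst hk3
    by_cases hk2 : (some 2 : Option Int) = a1
    case neg => rw [if_neg hk2] at h2; exact (pvChain15 h2 (by decide)).elim
    subst hk2
    by_cases hk1 : (some 1 : Option Int) = a0
    case neg => rw [if_neg hk1] at h1; exact (pvChain15 h1 (by decide)).elim
    subst hk1
    exact ⟨rfl, rfl, rfl, rfl, rfl, rfl, rfl, rfl, rfl, rfl, rfl, rfl, rfl, rfl, rfl, rfl⟩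
  · rintro ⟨rfl, rfl, rfl, rfl, rfl, rfl, rfl, rfl, rfl, rfl, rfl, rfl, rfl, rfl, rfl, rfl⟩
    decide

-- ===== VERDICT (by name: the statement is the Claim_ definition above) =====
theorem is_goal_spec : Claim_equal_is_goal := by
  intro board _ hpre
  unfold Spec_is_goal
  obtain ⟨hlen, hrows⟩ := hpre
  rcases board with _ | ⟨r0, _ | ⟨r1, _ | ⟨r2, _ | ⟨r3, rest⟩⟩⟩⟩ <;> simp at hlen
  have h0 := hrows r0 (by simp)
  have h1 := hrows r1 (by simp)
  have h2 := hrows r2 (by simp)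
  have h3 := hrows r3 (by simp)
  rcases r0 with _ | ⟨a0, _ | ⟨a1, _ | ⟨a2, _ | ⟨a3, t0⟩⟩⟩⟩ <;> simp at h0
  rcases r1 with _ | ⟨b0, _ | ⟨b1, _ | ⟨b2, _ | ⟨b3, t1⟩⟩⟩⟩ <;> simp at h1
  rcases r2 with _ | ⟨c0, _ | ⟨c1, _ | ⟨c2, _ | ⟨c3, t2⟩⟩⟩⟩ <;> simp at h2
  rcases r3 with _ | ⟨d0, _ | ⟨d1, _ | ⟨d2, _ | ⟨d3, t3⟩⟩⟩⟩ <;> simp at h3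
  exact Bool.eq_iff_iff.mpr
    ((a_char a0 a1 a2 a3 b0 b1 b2 b3 c0 c1 c2 c3 d0 d1 d2 d3 t0 t1 t2 t3 rest).trans
     (b_char a0 a1 a2 a3 b0 b1 b2 b3 c0 c1 c2 c3 d0 d1 d2 d3 t0 t1 t2 t3 rest).symm)
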